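-- pv_equiv track=rewrite | github.com/MardonBa/Hotel-Web-Scraping | scraping_functions.py | scrape_view
-- ===== SOURCE A (Python) =====
-- def scrape_view(room_name_list, num_prices):
--     views = []
--     for i in range(num_prices):
--         if "Courtyard view" in room_name_list[i]:
--             views.append("Courtyard view")
--         elif "Mountain view" in room_name_list[i]:
--             views.append("Mountain view")
--         elif "Pool View" in room_name_list[i]:
--             views.append("Pool View")
--         else:
--             views.append("N/A")
--
--     return views
-- ===== SOURCE B (Python) =====
-- def scrape_view(room_name_list, num_prices):
--     # Staged overwrite passes: start all "N/A", then one full pass per rule in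
--     # REVERSE priority order, so higher-priority labels overwrite lower ones.
--     views = ["N/A"] * num_prices
--     for sub in ("Pool View", "Mountain view", "Courtyard view"):
--         for i in range(num_prices):
--             if sub in room_name_list[i]:
--                 views[i] = sub
--     return views
-- ===== Notes on version B (the rewrite author's own statement) =====
-- stated objective: alternative
-- what changed: Instead of A's per-element first-match branch chain, B initialises all slots to 'N/A' and makes one full overwrite pass per rule in reverse priority order, so higher-priority labels overwrite lower ones.
import Mathlib
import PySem

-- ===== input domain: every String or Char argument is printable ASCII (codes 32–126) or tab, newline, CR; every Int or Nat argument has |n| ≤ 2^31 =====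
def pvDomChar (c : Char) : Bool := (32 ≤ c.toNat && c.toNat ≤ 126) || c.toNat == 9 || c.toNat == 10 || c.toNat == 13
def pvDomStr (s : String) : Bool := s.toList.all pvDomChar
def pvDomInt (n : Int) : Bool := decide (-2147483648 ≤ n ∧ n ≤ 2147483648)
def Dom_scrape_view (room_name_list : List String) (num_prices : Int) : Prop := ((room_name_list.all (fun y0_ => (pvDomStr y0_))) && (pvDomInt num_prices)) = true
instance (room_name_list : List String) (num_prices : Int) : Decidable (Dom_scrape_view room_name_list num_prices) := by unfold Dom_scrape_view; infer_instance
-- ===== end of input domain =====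

-- B replaces A's per-element first-match branch chain by staged overwrite passes
-- (one pass per rule, reverse priority order); same return values on Pre_.
-- ===== PORT A =====
def scrape_view (room_name_list : List String) (num_prices : Int) : List String :=
  (PySem.List.pyRange 0 num_prices 1).foldl (fun views i =>
    if PySem.Str.isIn "Courtyard view" (PySem.List.pyGetD room_name_list i "") then views ++ ["Courtyard view"]
    else if PySem.Str.isIn "Mountain view" (PySem.List.pyGetD room_name_list i "") then views ++ ["Mountain view"]
    else if PySem.Str.isIn "Pool View" (PySem.List.pyGetD room_name_list i "") then views ++ ["Pool View"]
    else views ++ ["N/A"]) []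

-- ===== PORT B =====
-- one overwrite pass for a single rule `sub`: views[i] = sub wherever sub in room_name_list[i]
def viewPass (room_name_list : List String) (num_prices : Int) (views : List String) (sub : String) : List String :=
  (PySem.List.pyRange 0 num_prices 1).foldl (fun vs i =>
    if PySem.Str.isIn sub (PySem.List.pyGetD room_name_list i "") then vs.set i.toNat sub else vs) views

def scrape_view_alt (room_name_list : List String) (num_prices : Int) : List String :=
  ["Pool View", "Mountain view", "Courtyard view"].foldl
    (viewPass room_name_list num_prices) (List.replicate num_prices.toNat "N/A")

-- ===== PRECONDITION & SPEC =====
-- Pre_ excludes exactly the inputs where Python A raises IndexError: num_prices larger than the list length.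
def Pre_scrape_view (room_name_list : List String) (num_prices : Int) : Prop :=
  num_prices ≤ (room_name_list.length : Int)
instance (room_name_list : List String) (num_prices : Int) : Decidable (Pre_scrape_view room_name_list num_prices) := by
  unfold Pre_scrape_view; infer_instance
def pvWitness_scrape_view : List String × Int := (["Pool View deluxe", "standard"], 2)

def Spec_scrape_view (room_name_list : List String) (num_prices : Int) (out : List String) : Prop := out = scrape_view_alt room_name_list num_prices
instance (room_name_list : List String) (num_prices : Int) (out : List String) : Decidable (Spec_scrape_view room_name_list num_prices out) := by unfold Spec_scrape_view; infer_instance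

-- ===== CLAIM =====
def Claim_equal_scrape_view : Prop := ∀ (room_name_list : List String) (num_prices : Int), Dom_scrape_view room_name_list num_prices → Pre_scrape_view room_name_list num_prices → Spec_scrape_view room_name_list num_prices (scrape_view room_name_list num_prices)

-- ===== LEMMAS AND PROOFS =====

-- Nat-indexed form of one overwrite pass
def natPass (room_name_list : List String) (sub : String) (m : Nat) (vs : List String) : List String :=
  (List.range m).foldl (fun vs k =>
    if PySem.Str.isIn sub (PySem.List.pyGetD room_name_list (Int.ofNat k) "") then vs.set k sub else vs) vs

theorem viewPass_eq_natPass (l : List String) (n : Int) (vs : List String) (sub : String) :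
    viewPass l n vs sub = natPass l sub n.toNat vs := by
  unfold viewPass natPass
  rw [PySem.List.pyRange_one, List.foldl_map]
  have hfg : (fun (vs : List String) (k : Nat) =>
      if PySem.Str.isIn sub (PySem.List.pyGetD l ((0:Int) + (k:Int)) "") then vs.set ((0:Int) + (k:Int)).toNat sub else vs) =
      (fun (vs : List String) (k : Nat) =>
      if PySem.Str.isIn sub (PySem.List.pyGetD l (Int.ofNat k) "") then vs.set k sub else vs) := by
    funext vs k
    simp [Int.ofNat_eq_natCast]
  rw [show n - 0 = n from by ring]
  exact congrFun (congrFun (congrArg List.foldl hfg) vs) (List.range n.toNat)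

theorem natPass_length (l : List String) (sub : String) (m : Nat) (vs : List String) :
    (natPass l sub m vs).length = vs.length := by
  induction m with
  | zero => rfl
  | succ m ih =>
    unfold natPass at *
    rw [List.range_succ, List.foldl_append, List.foldl_cons, List.foldl_nil]
    split
    · rw [List.length_set]; exact ih
    · exact ih

theorem natPass_get (l : List String) (sub : String) (m : Nat) (vs : List String)
    (j : Nat) (hj : j < vs.length) :
    (natPass l sub m vs)[j]'(by rw [natPass_length]; exact hj) =
      if j < m ∧ PySem.Str.isIn sub (PySem.List.pyGetD l (Int.ofNat j) "") = true then sub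
      else vs[j] := by
  induction m with
  | zero => simp [natPass]
  | succ m ih =>
    have hstep : natPass l sub (m+1) vs =
        (if PySem.Str.isIn sub (PySem.List.pyGetD l (Int.ofNat m) "") = true
         then (natPass l sub m vs).set m sub else natPass l sub m vs) := by
      unfold natPass
      rw [List.range_succ, List.foldl_append]
      rfl
    by_cases hjm : j = m
    · subst hjm
      by_cases hP : PySem.Str.isIn sub (PySem.List.pyGetD l (Int.ofNat j) "") = true
      · simp only [hstep, if_pos hP, List.getElem_set]
        exact (if_pos ⟨Nat.lt_succ_self j, hP⟩).symm
      · simp only [hstep, if_neg hP, ih]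
        rw [if_neg (fun h => absurd h.1 (Nat.lt_irrefl j)),
            if_neg (fun h => hP h.2)]
    · have hiff : (j < m) ↔ (j < m + 1) := by omega
      by_cases hP : PySem.Str.isIn sub (PySem.List.pyGetD l (Int.ofNat m) "") = true
      · simp only [hstep, if_pos hP, List.getElem_set, ih, hiff]
        rw [if_neg (fun h => hjm h.symm)]
      · simp only [hstep, if_neg hP, ih, hiff]

-- A's fold as a map over the range
theorem scrape_view_eq_map (l : List String) (n : Int) :
    scrape_view l n = (PySem.List.pyRange 0 n 1).map (fun i =>
      if PySem.Str.isIn "Courtyard view" (PySem.List.pyGetD l i "") then "Courtyard view"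
      else if PySem.Str.isIn "Mountain view" (PySem.List.pyGetD l i "") then "Mountain view"
      else if PySem.Str.isIn "Pool View" (PySem.List.pyGetD l i "") then "Pool View"
      else "N/A") := by
  unfold scrape_view
  have hbody :
      (fun (views : List String) (i : Int) =>
        if PySem.Str.isIn "Courtyard view" (PySem.List.pyGetD l i "") then views ++ ["Courtyard view"]
        else if PySem.Str.isIn "Mountain view" (PySem.List.pyGetD l i "") then views ++ ["Mountain view"]
        else if PySem.Str.isIn "Pool View" (PySem.List.pyGetD l i "") then views ++ ["Pool View"]
        else views ++ ["N/A"]) =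
      fun views i => views ++ [if PySem.Str.isIn "Courtyard view" (PySem.List.pyGetD l i "") then "Courtyard view"
        else if PySem.Str.isIn "Mountain view" (PySem.List.pyGetD l i "") then "Mountain view"
        else if PySem.Str.isIn "Pool View" (PySem.List.pyGetD l i "") then "Pool View"
        else "N/A"] := by
    funext views i
    split_ifs <;> rfl
  rw [hbody, PySem.List.foldl_append_singleton_eq_map, List.nil_append]

-- ===== VERDICT =====
theorem scrape_view_spec : Claim_equal_scrape_view := by
  intro l n _ _
  unfold Spec_scrape_view
  rw [scrape_view_eq_map]
  unfold scrape_view_alt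
  simp only [List.foldl_cons, List.foldl_nil, viewPass_eq_natPass]
  rw [PySem.List.pyRange_one, List.map_map]
  apply List.ext_getElem
  · simp [natPass_length]
  · intro j h1 h2
    have hjm : j < n.toNat := by
      simpa [natPass_length] using h2
    have hlen1 : j < (natPass l "Mountain view" n.toNat
        (natPass l "Pool View" n.toNat (List.replicate n.toNat "N/A"))).length := by
      simpa [natPass_length] using hjm
    have hlen2 : j < (natPass l "Pool View" n.toNat (List.replicate n.toNat "N/A")).length := by
      simpa [natPass_length] using hjm
    have hlen3 : j < (List.replicate n.toNat "N/A").length := by simpa using hjm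
    rw [List.getElem_map, List.getElem_range]
    simp only [natPass_get l "Courtyard view" n.toNat _ j hlen1,
        natPass_get l "Mountain view" n.toNat _ j hlen2,
        natPass_get l "Pool View" n.toNat _ j hlen3]
    simp only [Function.comp, List.getElem_replicate, zero_add, Int.ofNat_eq_natCast]
    split_ifs <;> simp_all
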